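-- pv_equiv track=rewrite | github.com/Risvaag/web-int | src/parsing/v2/article-data/crazy_urls.py | crazy_urls
-- ===== SOURCE A (Python) =====
-- def cap_words(s, index = 0):
--     all_words = []
--     def rec(s, index = 0):
--         if index >= len(s):
--             all_words.append(s)
--             return
--         # return one with title
--         with_title = s[:]
--         with_title[index] = s[index].capitalize()
--         rec(with_title, index + 1)
--         # and one without title
--         rec(s[:], index + 1)
--     # kick it all off
--     rec(s)
--     return all_words
--
-- def crazy_urls(url):
--     if '-' not in url or '.ece' not in url:
--         return []
--     last_part = url.split('.ece')[0].split('/')[-1]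
--     first_part = url.split('.ece')[0].split('/')[:-1]
--
--     ending = 'ece' + url.split('.ece')[1]
--     words = last_part.split('-')
--     article_id = words[-1]
--     words.pop()
--
--     # we wont handle words will really long titles - its a waste of time
--     if len(words) > 10:
--         return []
--
--     words = [word.lower() for word in words]
--
--     urls = []
--     for word_combo in cap_words(words):
--         new_url = '/'.join(first_part) + '/' + '-'.join(word_combo) + '-' + article_id + '.' + ending
--         urls.append(new_url)
--
--     return urls
-- ===== SOURCE B (Python) =====
-- def crazy_urls(url):
--     if '-' not in url or '.ece' not in url:
--         return []
--     pieces = url.split('.ece')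
--     slash_parts = pieces[0].split('/')
--     prefix, last_part = slash_parts[:-1], slash_parts[-1]
--     dash_parts = last_part.split('-')
--     words, article_id = dash_parts[:-1], dash_parts[-1]
--     if len(words) > 10:
--         return []
--     lows = [w.lower() for w in words]
--     caps = [w.capitalize() for w in lows]
--     n = len(words)
--     base = '/'.join(prefix) + '/'
--     suffix = '-' + article_id + '.' + 'ece' + pieces[1]
--     urls = []
--     for mask in range(1 << n):
--         combo = [lows[i] if (mask >> (n - 1 - i)) & 1 else caps[i] for i in range(n)]
--         urls.append(base + '-'.join(combo) + suffix)
--     return urls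
-- ===== Notes on version B (the rewrite author's own statement) =====
-- stated objective: alternative
-- what changed: Replaces the recursive cap_words tree (which copies and mutates the word list at each level) by a single loop over bitmasks 0..2^n-1 that decodes each mask directly into one capitalization combo, with precomputed lowered/capitalized word tables and precomputed URL prefix/suffix.
import Mathlib
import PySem

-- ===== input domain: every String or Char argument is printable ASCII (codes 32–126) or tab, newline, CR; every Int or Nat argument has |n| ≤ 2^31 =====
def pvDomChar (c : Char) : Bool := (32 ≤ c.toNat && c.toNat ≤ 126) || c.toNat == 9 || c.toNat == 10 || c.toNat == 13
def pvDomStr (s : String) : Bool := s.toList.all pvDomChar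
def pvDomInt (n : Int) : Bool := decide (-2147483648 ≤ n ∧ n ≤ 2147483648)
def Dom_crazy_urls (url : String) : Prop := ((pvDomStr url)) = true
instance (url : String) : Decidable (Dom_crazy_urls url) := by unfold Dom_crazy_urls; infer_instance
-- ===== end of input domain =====

-- B replaces A's top-down recursion over word indices (cap_words) by a direct enumeration of
-- the 2^n capitalization combos as bitmasks 0 .. 2^n-1 (alternative decomposition, same cost).

-- shared primitive: Python str.capitalize() — first char uppercased, rest lowercased; exact on the ASCII domain
def pyCapitalize (s : String) : String :=
  match s.toList with
  | [] => ""
  | c :: rest => String.ofList (PySem.Chars.upper [c] ++ PySem.Chars.lower rest)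

-- shared primitive: Python s.split(sep) for the non-empty literal separators used here (split? is some)
def pySplit (s sep : String) : List String := (PySem.Str.split? s sep).getD []

-- ===== PORT A =====
-- cap_words: the nested 'rec' appends to all_words in call order = left recursion result ++ right
def capWordsRec (s : List String) (index : Nat) : List (List String) :=
  if _h : index ≥ s.length then [s]
  else
    capWordsRec (s.set index (pyCapitalize (s.getD index ""))) (index + 1) ++
      capWordsRec s (index + 1)
termination_by s.length - index
decreasing_by
  · simp only [List.length_set]; omega
  · omega

def cap_words (s : List String) : List (List String) := capWordsRec s 0

def crazy_urls (url : String) : List String :=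
  if !PySem.Str.isIn "-" url || !PySem.Str.isIn ".ece" url then []
  else
    -- '.ece' in url, so split has ≥ 2 pieces and split('/') is nonempty: the getD defaults are unreachable
    let last_part := ((PySem.List.pyGet? (pySplit ((pySplit url ".ece").getD 0 "") "/") (-1)).getD "")
    let first_part := PySem.List.slice (pySplit ((pySplit url ".ece").getD 0 "") "/") none (some (-1))
    let ending := "ece" ++ (pySplit url ".ece").getD 1 ""
    let words0 := pySplit last_part "-"
    let article_id := (PySem.List.pyGet? words0 (-1)).getD ""
    let words1 := PySem.List.slice words0 none (some (-1))   -- words.pop() removes the last element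
    if words1.length > 10 then []
    else
      let words := words1.map PySem.Str.lower
      (cap_words words).foldl (fun urls word_combo =>
        urls ++ [PySem.Str.join "/" first_part ++ "/" ++ PySem.Str.join "-" word_combo ++ "-" ++
          article_id ++ "." ++ ending]) []

-- ===== PORT B =====
def crazy_urls_alt (url : String) : List String :=
  if !PySem.Str.isIn "-" url || !PySem.Str.isIn ".ece" url then []
  else
    let pieces := pySplit url ".ece"
    let slash_parts := pySplit (pieces.getD 0 "") "/"
    let prefix_ := PySem.List.slice slash_parts none (some (-1))
    let last_part := (PySem.List.pyGet? slash_parts (-1)).getD ""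
    let dash_parts := pySplit last_part "-"
    let words := PySem.List.slice dash_parts none (some (-1))
    let article_id := (PySem.List.pyGet? dash_parts (-1)).getD ""
    if words.length > 10 then []
    else
      let lows := words.map PySem.Str.lower
      let caps := lows.map pyCapitalize
      let n := words.length
      let base := PySem.Str.join "/" prefix_ ++ "/"
      let suffix := "-" ++ article_id ++ "." ++ ("ece" ++ pieces.getD 1 "")
      (List.range (1 <<< n)).map (fun mask =>
        base ++ PySem.Str.join "-" ((List.range n).map (fun i =>
          if (mask >>> (n - 1 - i)) &&& 1 = 1 then lows.getD i "" else caps.getD i "")) ++ suffix)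

-- ===== PRECONDITION & SPEC =====
def Spec_crazy_urls (url : String) (out : List String) : Prop := out = crazy_urls_alt url
instance (url : String) (out : List String) : Decidable (Spec_crazy_urls url out) := by unfold Spec_crazy_urls; infer_instance

-- ===== CLAIM (what is proved, stated in full; the proofs are below) =====
def Claim_equal_crazy_urls : Prop := ∀ (url : String), Dom_crazy_urls url → Spec_crazy_urls url (crazy_urls url)

-- ===== LEMMAS AND PROOFS =====

-- the combination tree both programs enumerate, as a structural recursion on the word list
def combos : List String → List (List String)
  | [] => [[]]
  | w :: ws => (combos ws).map (fun c => pyCapitalize w :: c) ++ (combos ws).map (fun c => w :: c)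

lemma capWordsRec_eq (s : List String) (index : Nat) :
    capWordsRec s index = (combos (s.drop index)).map (fun c => s.take index ++ c) := by
  unfold capWordsRec
  split_ifs with h
  · rw [List.drop_eq_nil_of_le h, List.take_of_length_le h]
    simp [combos]
  · rw [Nat.not_le] at h
    rw [capWordsRec_eq, capWordsRec_eq]
    rw [List.drop_set_of_lt (Nat.lt_succ_self index)]
    rw [List.drop_eq_getElem_cons h]
    simp only [combos, List.map_append, List.map_map]
    have h1 : ∀ c : List String,
        List.take (index + 1) (s.set index (pyCapitalize (s.getD index ""))) ++ c
          = List.take index s ++ pyCapitalize s[index] :: c := by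
      intro c
      rw [List.take_succ_eq_append_getElem (by simpa using h),
        List.getElem_set_self (by simpa using h),
        List.take_set_of_le (le_refl index),
        ← List.getElem_eq_getD (l := s) (i := index) (h := h) "",
        List.append_assoc, List.singleton_append]
    have h2 : ∀ c : List String,
        List.take (index + 1) s ++ c = List.take index s ++ s[index] :: c := by
      intro c
      rw [List.take_succ_eq_append_getElem h, List.append_assoc, List.singleton_append]
    simp only [Function.comp_def, h1, h2]
termination_by s.length - index

lemma shift_decomp (n k m : Nat) (hk : k ≤ n) : (2 ^ n + m) >>> k = 2 ^ (n - k) + m >>> k := by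
  rw [Nat.shiftRight_eq_div_pow, Nat.shiftRight_eq_div_pow]
  have h : 2 ^ n = 2 ^ k * 2 ^ (n - k) := by rw [← pow_add, Nat.add_sub_cancel' hk]
  rw [h, Nat.mul_add_div (Nat.two_pow_pos k)]

lemma bit_high0 (n m : Nat) (h : m < 2 ^ n) : (m >>> n) &&& 1 = 0 := by
  rw [Nat.shiftRight_eq_div_pow, Nat.div_eq_of_lt h]
  rfl

lemma bit_high1 (n m : Nat) (h : m < 2 ^ n) : ((2 ^ n + m) >>> n) &&& 1 = 1 := by
  rw [shift_decomp n n m le_rfl, Nat.sub_self, pow_zero, Nat.shiftRight_eq_div_pow,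
    Nat.div_eq_of_lt h]
  rfl

lemma bit_low (n k m : Nat) (hk : k < n) : ((2 ^ n + m) >>> k) &&& 1 = (m >>> k) &&& 1 := by
  rw [shift_decomp n k m hk.le, Nat.and_one_is_mod, Nat.and_one_is_mod]
  have h1 : n - k ≠ 0 := by omega
  obtain ⟨j, hj⟩ := Nat.exists_eq_succ_of_ne_zero h1
  rw [hj, pow_succ]
  omega

lemma shift_arg_congr (m a b : Nat) (x y : String) (h : a = b) :
    (if (m >>> a) &&& 1 = 1 then x else y) = (if (m >>> b) &&& 1 = 1 then x else y) := by rw [h]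

lemma mask_map_eq (ws : List String) :
    (List.range (2 ^ ws.length)).map (fun mask =>
      (List.range ws.length).map (fun i =>
        if (mask >>> (ws.length - 1 - i)) &&& 1 = 1 then ws.getD i "" else pyCapitalize (ws.getD i "")))
    = combos ws := by
  induction ws with
  | nil => simp [combos]
  | cons w rest ih =>
    have hsplit : (2 : Nat) ^ (w :: rest).length = 2 ^ rest.length + 2 ^ rest.length := by
      simp only [List.length_cons, pow_succ]; omega
    rw [hsplit, List.range_add, List.map_append, List.map_map]
    have hinner : ∀ m : Nat, (List.range (w :: rest).length).map (fun i =>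
        if (m >>> ((w :: rest).length - 1 - i)) &&& 1 = 1 then (w :: rest).getD i ""
        else pyCapitalize ((w :: rest).getD i ""))
        = (if (m >>> rest.length) &&& 1 = 1 then w else pyCapitalize w) ::
          (List.range rest.length).map (fun i =>
            if (m >>> (rest.length - 1 - i)) &&& 1 = 1 then rest.getD i "" else pyCapitalize (rest.getD i "")) := by
      intro m
      rw [List.length_cons, List.range_succ_eq_map, List.map_cons, List.map_map]
      refine congrArg₂ (· :: ·) ?_ ?_
      · simp only [List.getD_cons_zero]
        exact shift_arg_congr _ _ _ _ _ (by omega)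
      · apply List.map_congr_left
        intro i _
        simp only [Function.comp_apply, Nat.succ_eq_add_one, List.getD_cons_succ]
        exact shift_arg_congr _ _ _ _ _ (by omega)
    have hcombos : combos (w :: rest)
        = (combos rest).map (fun c => pyCapitalize w :: c) ++ (combos rest).map (fun c => w :: c) := rfl
    rw [hcombos]
    congr 1
    · rw [← ih, List.map_map]
      apply List.map_congr_left
      intro m hm
      rw [List.mem_range] at hm
      simp only [Function.comp_apply]
      rw [hinner m, bit_high0 rest.length m hm, if_neg (by decide)]
    · rw [← ih, List.map_map]
      apply List.map_congr_left
      intro m hm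
      rw [List.mem_range] at hm
      simp only [Function.comp_apply]
      rw [hinner (2 ^ rest.length + m), bit_high1 rest.length m hm, if_pos rfl]
      refine congrArg₂ (· :: ·) rfl ?_
      apply List.map_congr_left
      intro i hi
      rw [List.mem_range] at hi
      rw [bit_low rest.length (rest.length - 1 - i) m (by omega)]

lemma getD_map_cap (l : List String) (i : Nat) (h : i < l.length) :
    (l.map pyCapitalize).getD i "" = pyCapitalize (l.getD i "") := by
  have h2 : i < (l.map pyCapitalize).length := by simpa using h
  calc (l.map pyCapitalize).getD i "" = (l.map pyCapitalize)[i] := (List.getElem_eq_getD _).symm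
    _ = pyCapitalize l[i] := List.getElem_map ..
    _ = pyCapitalize (l.getD i "") := by rw [List.getElem_eq_getD]

-- the heart of the equivalence: A's loop over cap_words = B's loop over bitmasks
lemma main_lemma (words fp : List String) (aid tail : String) :
    ((cap_words (words.map PySem.Str.lower)).foldl (fun urls wc =>
        urls ++ [PySem.Str.join "/" fp ++ "/" ++ PySem.Str.join "-" wc ++ "-" ++ aid ++ "." ++ tail]) [])
    = (List.range (1 <<< words.length)).map (fun mask =>
        (PySem.Str.join "/" fp ++ "/") ++ PySem.Str.join "-" ((List.range words.length).map (fun i =>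
          if (mask >>> (words.length - 1 - i)) &&& 1 = 1 then (words.map PySem.Str.lower).getD i ""
          else ((words.map PySem.Str.lower).map pyCapitalize).getD i "")) ++ ("-" ++ aid ++ "." ++ tail)) := by
  have hL : (words.map PySem.Str.lower).length = words.length := List.length_map ..
  rw [PySem.List.foldl_append_singleton_eq_map, cap_words, capWordsRec_eq]
  simp only [List.drop_zero, List.take_zero, List.nil_append, List.map_id']
  have hR : ∀ m : Nat, (List.range words.length).map (fun i =>
        if (m >>> (words.length - 1 - i)) &&& 1 = 1 then (words.map PySem.Str.lower).getD i ""
        else ((words.map PySem.Str.lower).map pyCapitalize).getD i "")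
      = (List.range (words.map PySem.Str.lower).length).map (fun i =>
        if (m >>> ((words.map PySem.Str.lower).length - 1 - i)) &&& 1 = 1
        then (words.map PySem.Str.lower).getD i ""
        else pyCapitalize ((words.map PySem.Str.lower).getD i "")) := by
    intro m
    rw [hL]
    apply List.map_congr_left
    intro i hi
    rw [List.mem_range] at hi
    rw [getD_map_cap _ _ (by omega)]
  have hrange : (1 : Nat) <<< words.length = 2 ^ (words.map PySem.Str.lower).length := by
    rw [Nat.one_shiftLeft, hL]
  calc (combos (words.map PySem.Str.lower)).map (fun wc =>
          PySem.Str.join "/" fp ++ "/" ++ PySem.Str.join "-" wc ++ "-" ++ aid ++ "." ++ tail)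
      = ((List.range (2 ^ (words.map PySem.Str.lower).length)).map (fun mask =>
          (List.range (words.map PySem.Str.lower).length).map (fun i =>
            if (mask >>> ((words.map PySem.Str.lower).length - 1 - i)) &&& 1 = 1
            then (words.map PySem.Str.lower).getD i ""
            else pyCapitalize ((words.map PySem.Str.lower).getD i "")))).map (fun wc =>
          PySem.Str.join "/" fp ++ "/" ++ PySem.Str.join "-" wc ++ "-" ++ aid ++ "." ++ tail) := by
        rw [mask_map_eq]
    _ = _ := by
        rw [List.map_map, hrange]
        apply List.map_congr_left
        intro m _
        simp only [Function.comp]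
        rw [← hR m]
        simp [String.append_assoc]

-- ===== VERDICT (by name: the statement is the Claim_ definition above) =====
theorem crazy_urls_spec : Claim_equal_crazy_urls := by
  intro url _
  simp only [Spec_crazy_urls, crazy_urls, crazy_urls_alt]
  split_ifs with hguard hlen
  · rfl
  · rfl
  · exact main_lemma _ _ _ _
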